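-- pv_equiv track=rewrite | github.com/beingsage/Convolve | langgraph-service/agents/other_agents.py | _build_learning_path
-- ===== SOURCE A (Python) =====
-- from typing import Dict, Any, List
--
-- def _build_learning_path(concepts: List[Dict[str, Any]], relationships: List[Dict[str, Any]]) -> List[Dict[str, Any]]:
--     """Build an ordered learning path from concepts and relationships"""
--     # Simplified topological sort
--     # In production, use proper graph algorithms
--     path = []
--
--     # Start with foundational concepts
--     foundational = [c for c in concepts if c.get("difficulty", "intermediate") == "beginner"]
--     path.extend(foundational)
--
--     # Add intermediate concepts
--     intermediate = [c for c in concepts if c.get("difficulty", "intermediate") == "intermediate"]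
--     path.extend(intermediate)
--
--     # Add advanced concepts
--     advanced = [c for c in concepts if c.get("difficulty", "intermediate") == "advanced"]
--     path.extend(advanced)
--
--     return path
-- ===== SOURCE B (Python) =====
-- from typing import Dict, Any, List
--
-- def _build_learning_path(concepts: List[Dict[str, Any]], relationships: List[Dict[str, Any]]) -> List[Dict[str, Any]]:
--     """Build an ordered learning path: one grouping pass into three difficulty buckets."""
--     buckets = {"beginner": [], "intermediate": [], "advanced": []}
--     for c in concepts:
--         d = c.get("difficulty", "intermediate")
--         if d in buckets:
--             buckets[d].append(c)
--     return buckets["beginner"] + buckets["intermediate"] + buckets["advanced"]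
-- ===== Notes on version B (the rewrite author's own statement) =====
-- stated objective: idiomatic
-- what changed: Replaces A's three full filtering scans of `concepts` with a single grouping pass that appends each concept into one of three difficulty buckets and concatenates them.
import Mathlib
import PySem

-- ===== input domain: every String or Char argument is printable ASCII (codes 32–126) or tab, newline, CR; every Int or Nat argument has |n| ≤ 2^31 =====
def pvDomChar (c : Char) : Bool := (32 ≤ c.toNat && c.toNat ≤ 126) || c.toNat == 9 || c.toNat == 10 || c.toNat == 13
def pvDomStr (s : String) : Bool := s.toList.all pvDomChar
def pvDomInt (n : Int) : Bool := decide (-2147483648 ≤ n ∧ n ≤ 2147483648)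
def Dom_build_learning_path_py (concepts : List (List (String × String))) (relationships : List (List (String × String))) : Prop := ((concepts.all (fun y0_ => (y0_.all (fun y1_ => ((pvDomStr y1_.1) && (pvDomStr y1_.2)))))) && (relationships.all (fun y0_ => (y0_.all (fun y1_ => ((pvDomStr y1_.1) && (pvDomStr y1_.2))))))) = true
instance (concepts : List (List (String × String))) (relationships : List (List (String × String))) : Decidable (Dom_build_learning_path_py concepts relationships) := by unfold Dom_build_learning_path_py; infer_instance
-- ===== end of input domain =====

-- ===== PORT A =====
-- B changes: one grouping pass into three buckets instead of A's three filtering scans (idiomatic decomposition).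
-- c.get("difficulty", "intermediate") on the concept dict (assoc list)
def pvDiff (c : List (String × String)) : String :=
  (PySem.Dict.mk c).getD "difficulty" "intermediate"

def build_learning_path_py (concepts : List (List (String × String))) (relationships : List (List (String × String))) : List (List (String × String)) :=
  let path : List (List (String × String)) := []
  let foundational := concepts.filter (fun c => pvDiff c == "beginner")
  let path := path ++ foundational
  let intermediate := concepts.filter (fun c => pvDiff c == "intermediate")
  let path := path ++ intermediate
  let advanced := concepts.filter (fun c => pvDiff c == "advanced")
  let path := path ++ advanced
  path

-- ===== PORT B =====
def build_learning_path_py_alt (concepts : List (List (String × String))) (relationships : List (List (String × String))) : List (List (String × String)) :=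
  let buckets := concepts.foldl
    (fun (acc : List (List (String × String)) × List (List (String × String)) × List (List (String × String))) c =>
      let d := pvDiff c
      if d == "beginner" then (acc.1 ++ [c], acc.2.1, acc.2.2)
      else if d == "intermediate" then (acc.1, acc.2.1 ++ [c], acc.2.2)
      else if d == "advanced" then (acc.1, acc.2.1, acc.2.2 ++ [c])
      else acc)
    ([], [], [])
  buckets.1 ++ buckets.2.1 ++ buckets.2.2

-- ===== PRECONDITION & SPEC =====
def Spec_build_learning_path_py (concepts : List (List (String × String))) (relationships : List (List (String × String))) (out : List (List (String × String))) : Prop := out = build_learning_path_py_alt concepts relationships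
instance (concepts : List (List (String × String))) (relationships : List (List (String × String))) (out : List (List (String × String))) : Decidable (Spec_build_learning_path_py concepts relationships out) := by unfold Spec_build_learning_path_py; infer_instance

-- ===== CLAIM (what is proved, stated in full; the proofs are below) =====
def Claim_equal_build_learning_path_py : Prop := ∀ (concepts : List (List (String × String))) (relationships : List (List (String × String))), Dom_build_learning_path_py concepts relationships → Spec_build_learning_path_py concepts relationships (build_learning_path_py concepts relationships)

-- ===== LEMMAS AND PROOFS =====
theorem pv_fold_buckets (cs : List (List (String × String)))
    (b i a : List (List (String × String))) :
    cs.foldl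
      (fun (acc : List (List (String × String)) × List (List (String × String)) × List (List (String × String))) c =>
        let d := pvDiff c
        if d == "beginner" then (acc.1 ++ [c], acc.2.1, acc.2.2)
        else if d == "intermediate" then (acc.1, acc.2.1 ++ [c], acc.2.2)
        else if d == "advanced" then (acc.1, acc.2.1, acc.2.2 ++ [c])
        else acc)
      (b, i, a)
    = (b ++ cs.filter (fun c => pvDiff c == "beginner"),
       i ++ cs.filter (fun c => pvDiff c == "intermediate"),
       a ++ cs.filter (fun c => pvDiff c == "advanced")) := by
  induction cs generalizing b i a with
  | nil => simp
  | cons c cs ih =>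
    simp only [List.foldl_cons, List.filter_cons]
    by_cases h1 : pvDiff c == "beginner" <;> by_cases h2 : pvDiff c == "intermediate" <;>
      by_cases h3 : pvDiff c == "advanced" <;>
      simp_all [ih]

-- ===== VERDICT (by name: the statement is the Claim_ definition above) =====
theorem build_learning_path_py_spec : Claim_equal_build_learning_path_py := by
  intro concepts relationships _
  show _ = build_learning_path_py_alt concepts relationships
  unfold build_learning_path_py build_learning_path_py_alt
  rw [pv_fold_buckets]
  simp
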